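-- pv_equiv track=rewrite | github.com/kirk0830/DEPRECATED_ABACUS-pseudopot-nao-square | base/scans.py | scan_elements
-- ===== SOURCE A (Python) =====
-- def scan_elements(system: str) -> list:
--
--     # read letter in system one by one, from the beginning capitalized letter, if meet another, then cut the string
--     # and save the previous string to the list, until the end of the string
--     elements = []
--     element = ""
--     for letter in system:
--         if letter.isupper():
--             if element != "":
--                 elements.append(element)
--             element = letter
--         else:
--             element += letter
--     elements.append(element)
--     return elements
-- ===== SOURCE B (Python) =====
-- def scan_elements(system: str) -> list:
--     # right-to-left single pass: grow the current (leftmost-known) chunk at its front,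
--     # and close it off whenever an uppercase letter is reached
--     head, rest = "", []
--     for ch in reversed(system):
--         head = ch + head
--         if ch.isupper():
--             rest = [head] + rest
--             head = ""
--     return rest if rest and head == "" else [head] + rest
-- ===== Notes on version B (the rewrite author's own statement) =====
-- stated objective: alternative
-- what changed: B scans the string right-to-left with a foldr-style state (current chunk grown at its front, closed when an uppercase letter is reached), instead of A's left-to-right accumulator with an emptiness test before each append.
import Mathlib
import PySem

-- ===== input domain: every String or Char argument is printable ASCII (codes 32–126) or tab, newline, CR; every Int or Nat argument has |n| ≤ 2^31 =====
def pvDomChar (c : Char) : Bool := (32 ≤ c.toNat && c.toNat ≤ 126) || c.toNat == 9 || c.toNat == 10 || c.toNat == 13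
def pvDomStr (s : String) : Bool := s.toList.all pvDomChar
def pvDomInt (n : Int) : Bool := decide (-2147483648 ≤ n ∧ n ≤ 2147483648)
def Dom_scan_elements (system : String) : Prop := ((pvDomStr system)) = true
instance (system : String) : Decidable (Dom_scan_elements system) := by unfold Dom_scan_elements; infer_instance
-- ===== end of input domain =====

-- B differs from A: it scans right-to-left with a foldr-style state (current chunk grown at its
-- front, closed at each uppercase letter) instead of A's left-to-right accumulator. Same results.

-- ===== PORT A =====
-- state: (elements, element); element += letter is (· ++ [c])
def scan_elements (system : String) : List String :=
  let st := system.toList.foldl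
    (fun (st : List (List Char) × List Char) c =>
      if PySem.Chars.isupper c then
        ((if st.2 ≠ [] then st.1 ++ [st.2] else st.1), [c])
      else
        (st.1, st.2 ++ [c]))
    ([], [])
  (st.1 ++ [st.2]).map (fun l => String.ofList l)

-- ===== PORT B =====
-- state: (head, rest); 'ch + head' is cons, closing a chunk prepends it to rest
def scan_elements_alt (system : String) : List String :=
  let st := system.toList.foldr
    (fun c (st : List Char × List (List Char)) =>
      let head := c :: st.1
      if PySem.Chars.isupper c then ([], head :: st.2) else (head, st.2))
    ([], [])
  (if st.2 ≠ [] ∧ st.1 = [] then st.2 else st.1 :: st.2).map (fun l => String.ofList l)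

-- ===== PRECONDITION & SPEC =====
def Spec_scan_elements (system : String) (out : List String) : Prop := out = scan_elements_alt system
instance (system : String) (out : List String) : Decidable (Spec_scan_elements system out) := by unfold Spec_scan_elements; infer_instance

-- ===== CLAIM (what is proved, stated in full; the proofs are below) =====
def Claim_equal_scan_elements : Prop := ∀ (system : String), Dom_scan_elements system → Spec_scan_elements system (scan_elements system)

-- ===== LEMMAS AND PROOFS =====

-- reference splitter: pvGo cur rest = the chunks of cur-then-rest, with chunk cur already open
def pvGo (cur : List Char) : List Char → List (List Char)
  | [] => [cur]
  | c :: cs => if PySem.Chars.isupper c then cur :: pvGo [c] cs else pvGo (cur ++ [c]) cs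

-- A's fold, once the current element is nonempty, computes pvGo
theorem pvA_fold (rest : List Char) : ∀ (acc : List (List Char)) (cur : List Char), cur ≠ [] →
    (let st := rest.foldl
      (fun (st : List (List Char) × List Char) c =>
        if PySem.Chars.isupper c then
          ((if st.2 ≠ [] then st.1 ++ [st.2] else st.1), [c])
        else
          (st.1, st.2 ++ [c]))
      (acc, cur)
     st.1 ++ [st.2]) = acc ++ pvGo cur rest := by
  induction rest with
  | nil => intro acc cur _; simp [pvGo]
  | cons c cs ih =>
    intro acc cur hcur
    by_cases hu : PySem.Chars.isupper c
    · simpa [List.foldl_cons, hu, hcur, pvGo] using ih (acc ++ [cur]) [c] (by simp)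
    · simpa [List.foldl_cons, hu, pvGo] using ih acc (cur ++ [c]) (by simp)

-- B's foldr state (head, rest) satisfies: pvGo cur s = (cur ++ head) :: rest
theorem pvB_fold (s : List Char) : ∀ (cur : List Char),
    pvGo cur s =
      (cur ++ (s.foldr
        (fun c (st : List Char × List (List Char)) =>
          let head := c :: st.1
          if PySem.Chars.isupper c then ([], head :: st.2) else (head, st.2))
        ([], [])).1) ::
      (s.foldr
        (fun c (st : List Char × List (List Char)) =>
          let head := c :: st.1
          if PySem.Chars.isupper c then ([], head :: st.2) else (head, st.2))
        ([], [])).2 := by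
  induction s with
  | nil => intro cur; simp [pvGo]
  | cons c cs ih =>
    intro cur
    by_cases hu : PySem.Chars.isupper c
    · simp [pvGo, hu, ih [c]]
    · simp [pvGo, hu, ih (cur ++ [c])]

-- ===== VERDICT (by name: the statement is the Claim_ definition above) =====
theorem scan_elements_spec : Claim_equal_scan_elements := by
  intro system _
  unfold Spec_scan_elements scan_elements scan_elements_alt
  cases hs : system.toList with
  | nil => simp
  | cons c cs =>
    have hA := pvA_fold cs [] [c] (by simp)
    have hB := pvB_fold cs [c]
    simp only [List.nil_append] at hA
    refine congrArg (List.map (fun l => String.ofList l)) ?_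
    by_cases hu : PySem.Chars.isupper c
    · simp only [ne_eq] at hA
      simp only [List.singleton_append] at hB
      simp only [List.foldl_cons, List.foldr_cons, hu, ne_eq, not_true, reduceIte,
        not_false_eq_true, List.cons_ne_nil, and_self, if_true]
      rw [hA, hB]
    · simp only [ne_eq] at hA
      simp only [List.singleton_append] at hB
      simp only [List.foldl_cons, List.foldr_cons, hu, Bool.false_eq_true, 
        List.nil_append, ne_eq, reduceCtorEq, and_false, if_false]
      rw [hA, hB]
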